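-- pv_equiv track=rewrite | github.com/walmis/VPforce-TelemFFB | settingsmanager.py | generate_regex_patterns
-- ===== SOURCE A (Python) =====
-- def generate_regex_patterns(input_str):
--     words = input_str.split()
--     patterns = []
--
--     for i in range(len(words), 0, -1):
--         pattern = ' '.join(words[:i])
--         pattern += ".*"
--         patterns.append(pattern)
--
--     return patterns
-- ===== SOURCE B (Python) =====
-- def generate_regex_patterns(input_str):
--     patterns = []
--     running = ""
--     for word in input_str.split():
--         running = running + " " + word if patterns else word
--         patterns.append(running + ".*")
--     return list(reversed(patterns))
-- ===== Notes on version B (the rewrite author's own statement) =====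
-- stated objective: alternative
-- what changed: Replaces the descending index loop that re-joins each prefix from scratch with a single forward pass keeping a running prefix string, appending each pattern and reversing at the end.
import Mathlib
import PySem

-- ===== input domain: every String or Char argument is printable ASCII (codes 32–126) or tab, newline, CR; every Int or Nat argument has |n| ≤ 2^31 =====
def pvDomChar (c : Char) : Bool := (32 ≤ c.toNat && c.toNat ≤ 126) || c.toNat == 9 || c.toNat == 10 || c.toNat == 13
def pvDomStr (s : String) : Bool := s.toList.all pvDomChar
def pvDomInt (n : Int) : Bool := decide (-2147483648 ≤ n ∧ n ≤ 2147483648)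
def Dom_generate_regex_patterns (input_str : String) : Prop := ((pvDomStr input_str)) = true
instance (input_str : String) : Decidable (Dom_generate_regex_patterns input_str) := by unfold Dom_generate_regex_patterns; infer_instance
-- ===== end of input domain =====

-- B replaces A's descending loop that re-joins every prefix from scratch with one forward
-- pass keeping a running prefix string, then reverses the collected list.

-- ===== PORT A =====
def generate_regex_patterns (input_str : String) : List String :=
  let words := PySem.Str.split₀ input_str
  (PySem.List.pyRange (words.length : Int) 0 (-1)).foldl
    (fun patterns i =>
      patterns ++ [PySem.Str.join " " (PySem.List.slice words none (some i)) ++ ".*"]) []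

-- ===== PORT B =====
def grpLoop (words : List String) (patterns : List String) (running : String) : List String :=
  match words with
  | [] => patterns
  | w :: rest =>
    let running' := if patterns.isEmpty then w else running ++ " " ++ w
    grpLoop rest (patterns ++ [running' ++ ".*"]) running'

def generate_regex_patterns_alt (input_str : String) : List String :=
  (grpLoop (PySem.Str.split₀ input_str) [] "").reverse

-- ===== PRECONDITION & SPEC =====
def Spec_generate_regex_patterns (input_str : String) (out : List String) : Prop := out = generate_regex_patterns_alt input_str
instance (input_str : String) (out : List String) : Decidable (Spec_generate_regex_patterns input_str out) := by unfold Spec_generate_regex_patterns; infer_instance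

-- ===== CLAIM (what is proved, stated in full; the proofs are below) =====
def Claim_equal_generate_regex_patterns : Prop := ∀ (input_str : String), Dom_generate_regex_patterns input_str → Spec_generate_regex_patterns input_str (generate_regex_patterns input_str)

-- ===== LEMMAS AND PROOFS =====

-- foldl that only appends is a map
lemma foldl_append_map {α β : Type} (l : List α) (f : α → β) (acc : List β) :
    l.foldl (fun a x => a ++ [f x]) acc = acc ++ l.map f := by
  induction l generalizing acc with
  | nil => simp
  | cons x xs ih => simp [List.foldl, ih]

lemma chars_join_append_singleton (sep : List Char) (q : List Char) (ps : List (List Char))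
    (w : List Char) :
    PySem.Chars.join sep ((q :: ps) ++ [w]) = PySem.Chars.join sep (q :: ps) ++ sep ++ w := by
  induction ps generalizing q with
  | nil => simp [PySem.Chars.join_cons_cons, PySem.Chars.join_singleton]
  | cons b bs ih =>
    rw [List.cons_append, List.cons_append, PySem.Chars.join_cons_cons,
      ← List.cons_append, ih b, PySem.Chars.join_cons_cons]
    simp [List.append_assoc]

-- ' '.join over a prefix extended by one more word
lemma join_append_singleton (p : List String) (w : String) (hp : p ≠ []) :
    PySem.Str.join " " (p ++ [w]) = PySem.Str.join " " p ++ " " ++ w := by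
  apply String.toList_inj.mp
  cases p with
  | nil => exact absurd rfl hp
  | cons a as =>
    simp only [PySem.Str.toList_join, String.toList_append, List.map_append, List.map_cons,
      List.map_nil]
    exact chars_join_append_singleton _ _ _ _

lemma join_singleton_str (w : String) : PySem.Str.join " " [w] = w := by
  apply String.toList_inj.mp
  simp [PySem.Str.toList_join, PySem.Chars.join_singleton]

-- characterisation of B's forward loop, with the prefix p already consumed
lemma grpLoop_spec (ws : List String) : ∀ (p : List String), p ≠ [] →
    grpLoop ws ((List.range p.length).map
        (fun k => PySem.Str.join " " (p.take (k+1)) ++ ".*")) (PySem.Str.join " " p)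
      = (List.range (p ++ ws).length).map
        (fun k => PySem.Str.join " " ((p ++ ws).take (k+1)) ++ ".*") := by
  induction ws with
  | nil => intro p _; simp [grpLoop]
  | cons w rest ih =>
    intro p hp
    have hlen : p.length ≠ 0 := by simpa using fun h => hp (List.eq_nil_of_length_eq_zero h)
    have hemp : ((List.range p.length).map
        (fun k => PySem.Str.join " " (p.take (k+1)) ++ ".*")).isEmpty = false := by
      simp [hlen]
    rw [grpLoop]
    simp only [hemp, Bool.false_eq_true, if_false]
    rw [← join_append_singleton p w hp]
    have hout : (List.range p.length).map
          (fun k => PySem.Str.join " " (p.take (k+1)) ++ ".*")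
          ++ [PySem.Str.join " " (p ++ [w]) ++ ".*"]
        = (List.range (p ++ [w]).length).map
          (fun k => PySem.Str.join " " ((p ++ [w]).take (k+1)) ++ ".*") := by
      rw [List.length_append, List.length_singleton, List.range_succ, List.map_append]
      congr 1
      · apply List.map_congr_left
        intro k hk
        rw [List.mem_range] at hk
        rw [List.take_append_of_le_length (by omega)]
      · simp only [List.map_cons, List.map_nil]
        rw [List.take_of_length_le (by simp)]
    rw [hout, ih (p ++ [w]) (by simp)]
    simp [List.append_assoc]

lemma grpLoop_eq (ws : List String) :
    grpLoop ws [] "" = (List.range ws.length).map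
      (fun k => PySem.Str.join " " (ws.take (k+1)) ++ ".*") := by
  cases ws with
  | nil => simp [grpLoop]
  | cons w rest =>
    rw [grpLoop]
    simp only [List.isEmpty_nil, if_true, List.nil_append]
    have h1 : [w ++ ".*"] = (List.range ([w] : List String).length).map
        (fun k => PySem.Str.join " " (([w] : List String).take (k+1)) ++ ".*") := by
      simp [join_singleton_str]
    have h2 := grpLoop_spec rest [w] (by simp)
    rw [join_singleton_str] at h2
    rw [h1, h2]
    simp

-- ===== VERDICT (by name: the statement is the Claim_ definition above) =====
theorem generate_regex_patterns_spec : Claim_equal_generate_regex_patterns := by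
  intro input_str _
  unfold Spec_generate_regex_patterns generate_regex_patterns generate_regex_patterns_alt
  generalize PySem.Str.split₀ input_str = ws
  rw [foldl_append_map, List.nil_append, grpLoop_eq, PySem.List.pyRange_neg_one_eq_reverse,
    PySem.List.pyRange_one, List.map_reverse, List.map_map]
  congr 1
  have hn : ((ws.length : Int) + 1 - (0 + 1)).toNat = ws.length := by omega
  rw [hn]
  apply List.map_congr_left
  intro k _
  have hcast : (0:Int) + 1 + (k : Int) = ((k + 1 : Nat) : Int) := by push_cast; ring
  simp only [Function.comp, hcast, PySem.List.slice_to_natCast]
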